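-- pv_equiv track=rewrite | github.com/MaybebabyEnjoyer/ITMO | course1/sem1/discrete-math/Lab-3/5.py | generate_vectors
-- ===== SOURCE A (Python) =====
-- def generate_vectors(n, k):
-- 	if n == 0:
-- 		return [[]]
-- 	else:
-- 		return [vector[:i] + [digit] + vector[i:]
-- 		        for vector in generate_vectors(n - 1, k)
-- 		        for i in range(n)
-- 		        for digit in range(k)]
-- ===== SOURCE B (Python) =====
-- def _grow(res, m, k):
-- 	return [v[:i] + [d] + v[i:]
-- 	        for v in res
-- 	        for i in range(m)
-- 	        for d in range(k)]
--
-- def generate_vectors(n, k):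
-- 	res = [[]]
-- 	for m in range(1, n + 1):
-- 		res = _grow(res, m, k)
-- 	return res
-- ===== Notes on version B (the rewrite author's own statement) =====
-- stated objective: simpler
-- what changed: Replaced the top-down recursion with an explicit bottom-up loop that grows the running list of length-m vectors from [[]] for m = 1..n; same insertion order, so the output is identical.
import Mathlib
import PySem

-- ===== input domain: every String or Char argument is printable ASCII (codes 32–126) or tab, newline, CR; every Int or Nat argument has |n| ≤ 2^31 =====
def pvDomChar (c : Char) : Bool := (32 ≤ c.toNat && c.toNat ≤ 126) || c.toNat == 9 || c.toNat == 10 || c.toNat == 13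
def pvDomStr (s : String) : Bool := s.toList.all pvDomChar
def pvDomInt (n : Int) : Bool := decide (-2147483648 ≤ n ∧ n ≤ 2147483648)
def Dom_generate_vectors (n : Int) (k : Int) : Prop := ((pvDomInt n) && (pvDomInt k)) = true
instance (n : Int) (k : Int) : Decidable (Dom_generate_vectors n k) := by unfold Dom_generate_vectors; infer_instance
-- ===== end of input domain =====

-- B replaces A's top-down recursion by a bottom-up loop growing the vector list from [[]]; objective: simpler.

-- ===== PORT A =====
-- literal port of A; the 'n < 0 → []' branch is only a totality guard: Python A
-- recurses forever (RecursionError) there, which Pre_ excludes.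
def generate_vectors (n : Int) (k : Int) : List (List Int) :=
  if n == 0 then [[]]
  else if n < 0 then []
  else
    (generate_vectors (n - 1) k).flatMap fun vector =>
      (PySem.List.pyRange 0 n 1).flatMap fun i =>
        (PySem.List.pyRange 0 k 1).map fun digit =>
          PySem.List.slice vector none (some i) ++ [digit] ++ PySem.List.slice vector (some i) none
termination_by n.toNat
decreasing_by
  rename_i h1 h2
  simp only [beq_iff_eq] at h1
  omega

-- ===== PORT B =====
-- port of Source B's helper _grow
def pvGrow (res : List (List Int)) (m : Int) (k : Int) : List (List Int) :=
  res.flatMap fun v =>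
    (PySem.List.pyRange 0 m 1).flatMap fun i =>
      (PySem.List.pyRange 0 k 1).map fun d =>
        PySem.List.slice v none (some i) ++ [d] ++ PySem.List.slice v (some i) none

def generate_vectors_alt (n : Int) (k : Int) : List (List Int) :=
  (PySem.List.pyRange 1 (n + 1) 1).foldl (fun res m => pvGrow res m k) [[]]

-- ===== PRECONDITION & SPEC =====
-- Pre_ excludes n < 0, on which Python A recurses without bound (RecursionError).
def Pre_generate_vectors (n : Int) (k : Int) : Prop := 0 ≤ n
instance (n : Int) (k : Int) : Decidable (Pre_generate_vectors n k) := by unfold Pre_generate_vectors; infer_instance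
def pvWitness_generate_vectors : Int × Int := (2, 2)

def Spec_generate_vectors (n : Int) (k : Int) (out : List (List Int)) : Prop := out = generate_vectors_alt n k
instance (n : Int) (k : Int) (out : List (List Int)) : Decidable (Spec_generate_vectors n k out) := by unfold Spec_generate_vectors; infer_instance

-- ===== CLAIM (what is proved, stated in full; the proofs are below) =====
def Claim_equal_generate_vectors : Prop := ∀ (n : Int) (k : Int), Dom_generate_vectors n k → Pre_generate_vectors n k → Spec_generate_vectors n k (generate_vectors n k)

-- ===== LEMMAS AND PROOFS =====

lemma gv_eq_alt_nat (N : Nat) (k : Int) :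
    generate_vectors (N : Int) k = generate_vectors_alt (N : Int) k := by
  induction N with
  | zero =>
      simp [generate_vectors, generate_vectors_alt, PySem.List.pyRange_one_eq_nil]
  | succ m ih =>
      have hA : generate_vectors ((m + 1 : Nat) : Int) k
          = pvGrow (generate_vectors (m : Int) k) ((m + 1 : Nat) : Int) k := by
        rw [generate_vectors, if_neg (by simp only [beq_iff_eq]; push_cast; omega), if_neg (by omega)]
        have : ((m + 1 : Nat) : Int) - 1 = (m : Int) := by push_cast; ring
        rw [this, pvGrow]
      have hB : generate_vectors_alt ((m + 1 : Nat) : Int) k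
          = pvGrow (generate_vectors_alt (m : Int) k) ((m + 1 : Nat) : Int) k := by
        unfold generate_vectors_alt
        have hle : (1 : Int) ≤ (m : Int) + 1 := by omega
        have : ((m + 1 : Nat) : Int) + 1 = ((m : Int) + 1) + 1 := by push_cast; ring
        rw [this, PySem.List.pyRange_one_succ_right hle, List.foldl_append]
        push_cast
        simp
      rw [hA, hB, ih]

-- ===== VERDICT (by name: the statement is the Claim_ definition above) =====
theorem generate_vectors_spec : Claim_equal_generate_vectors := by
  intro n k _ hpre
  unfold Spec_generate_vectors
  have h := gv_eq_alt_nat n.toNat k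
  rwa [Int.toNat_of_nonneg hpre] at h
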